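-- pv_equiv track=rewrite | github.com/santimaldo/LiMetalNMR | Geometria.py | bulk
-- ===== SOURCE A (Python) =====
-- def bulk(N, voxelSize):
--   """
--   es una funcion que devuelve las tuplas con los indices de todos los elementos
--   de una matriz Nmz*Nmy*Nmx
--   """
--   Nmz,Nmy,Nmx = N
--
--   indices = []
--   for k in range(Nmz):
--     for j in range(Nmy):
--       for i in range(Nmx):
--         indices.append((k,j,i))
--   return indices
-- ===== SOURCE B (Python) =====
-- def bulk(N, voxelSize):
--   Nmz, Nmy, Nmx = N
--   if Nmz <= 0 or Nmy <= 0 or Nmx <= 0: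
--     return []
--   plane = Nmy * Nmx
--   indices = []
--   for idx in range(Nmz * plane):
--     k, r = divmod(idx, plane)
--     j, i = divmod(r, Nmx)
--     indices.append((k, j, i))
--   return indices
-- ===== Notes on version B (the rewrite author's own statement) =====
-- stated objective: alternative
-- what changed: Replaces the three nested loops by a single loop over one flat index idx in range(Nmz*Nmy*Nmx), recovering (k, j, i) by two divmods (row-major decoding); same output order, same ignoring of voxelSize.
import Mathlib
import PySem

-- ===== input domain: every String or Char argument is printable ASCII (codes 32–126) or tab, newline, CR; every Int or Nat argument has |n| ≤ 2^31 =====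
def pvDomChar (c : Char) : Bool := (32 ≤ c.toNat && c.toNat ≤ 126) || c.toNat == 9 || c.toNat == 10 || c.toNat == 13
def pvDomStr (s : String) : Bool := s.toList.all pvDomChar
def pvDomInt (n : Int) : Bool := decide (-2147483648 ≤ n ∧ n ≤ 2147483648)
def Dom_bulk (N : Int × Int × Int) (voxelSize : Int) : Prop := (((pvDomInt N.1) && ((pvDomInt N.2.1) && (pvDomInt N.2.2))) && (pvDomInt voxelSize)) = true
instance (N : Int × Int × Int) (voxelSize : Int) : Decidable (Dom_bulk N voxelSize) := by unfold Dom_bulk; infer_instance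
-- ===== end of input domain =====

-- B replaces the three nested loops by one loop over a flat index decoded with two divmods (same output, same cost).

-- ===== PORT A =====
-- literal port of A: three nested for-loops appending (k, j, i); voxelSize is unused, as in A
def bulk (N : Int × Int × Int) (voxelSize : Int) : List (Int × Int × Int) :=
  (PySem.List.pyRange 0 N.1 1).foldl (fun acc k =>
    (PySem.List.pyRange 0 N.2.1 1).foldl (fun acc j =>
      (PySem.List.pyRange 0 N.2.2 1).foldl (fun acc i =>
        acc ++ [(k, j, i)]) acc) acc) []

-- ===== PORT B =====
-- literal port of B: guard on nonpositive dimensions, then one loop over the flat index with two divmods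
def bulk_alt (N : Int × Int × Int) (voxelSize : Int) : List (Int × Int × Int) :=
  if N.1 ≤ 0 ∨ N.2.1 ≤ 0 ∨ N.2.2 ≤ 0 then []
  else
    let plane := N.2.1 * N.2.2
    (PySem.List.pyRange 0 (N.1 * plane) 1).foldl (fun acc idx =>
      let k := PySem.Int.floordiv idx plane
      let r := PySem.Int.mod idx plane
      let j := PySem.Int.floordiv r N.2.2
      let i := PySem.Int.mod r N.2.2
      acc ++ [(k, j, i)]) []

-- ===== PRECONDITION & SPEC =====
def Spec_bulk (N : Int × Int × Int) (voxelSize : Int) (out : List (Int × Int × Int)) : Prop := out = bulk_alt N voxelSize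
instance (N : Int × Int × Int) (voxelSize : Int) (out : List (Int × Int × Int)) : Decidable (Spec_bulk N voxelSize out) := by unfold Spec_bulk; infer_instance

-- ===== CLAIM (what is proved, stated in full; the proofs are below) =====
def Claim_equal_bulk : Prop := ∀ (N : Int × Int × Int) (voxelSize : Int), Dom_bulk N voxelSize → Spec_bulk N voxelSize (bulk N voxelSize)

-- ===== LEMMAS AND PROOFS =====

-- row-major decoding: mapping (idx // P, idx % P) over range(z*P) is the nested loop over range(z) × range(P)
theorem pv_decode {α : Type} (g : Int → Int → α) (P : Int) (hP : 0 < P) (z : Nat) :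
    (PySem.List.pyRange 0 ((z : Int) * P) 1).map
        (fun idx => g (PySem.Int.floordiv idx P) (PySem.Int.mod idx P))
      = (PySem.List.pyRange 0 (z : Int) 1).flatMap
          (fun k => (PySem.List.pyRange 0 P 1).map (fun r => g k r)) := by
  induction z with
  | zero => simp [PySem.List.pyRange_one_eq_nil]
  | succ z ih =>
    have h1 : (0 : Int) ≤ (z : Int) * P := by positivity
    have h2 : (z : Int) * P ≤ ((z : Int) + 1) * P := by nlinarith
    have hcast : (((z + 1 : Nat)) : Int) = (z : Int) + 1 := by push_cast; ring
    rw [show (PySem.List.pyRange 0 ((((z+1 : Nat)) : Int) * P) 1) = PySem.List.pyRange 0 (((z : Int) + 1) * P) 1 from by rw [hcast],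
        PySem.List.pyRange_one_append 0 ((z : Int) * P) (((z : Int) + 1) * P) h1 h2,
        List.map_append, ih, hcast,
        PySem.List.pyRange_one_succ_right (by omega : (0 : Int) ≤ (z : Int)),
        List.flatMap_append]
    congr 1
    · simp only [List.flatMap_cons, List.flatMap_nil, List.append_nil]
      rw [PySem.List.pyRange_one ((z : Int) * P) (((z : Int) + 1) * P),
          PySem.List.pyRange_one 0 P]
      have hlen : ((((z : Int) + 1) * P) - (z : Int) * P).toNat = (P - 0).toNat := by
        push_cast; congr 1; ring
      rw [hlen, List.map_map, List.map_map]
      apply List.map_congr_left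
      intro r hr
      have hrP : (r : Int) < P := by
        have := List.mem_range.mp hr
        omega
      have hr0 : (0 : Int) ≤ (r : Int) := by positivity
      have hfd : PySem.Int.floordiv ((z : Int) * P + (r : Int)) P = (z : Int) := by
        rw [PySem.Int.floordiv_eq_iff_of_pos hP]
        constructor
        · omega
        · nlinarith
      have hmd : PySem.Int.mod ((z : Int) * P + (r : Int)) P = (r : Int) := by
        have := PySem.Int.floordiv_mul_add_mod ((z : Int) * P + (r : Int)) P
        rw [hfd] at this
        omega
      simp [hfd, hmd]

theorem bulk_pos (N : Int × Int × Int) (voxelSize : Int)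
    (hz : 0 < N.1) (hy : 0 < N.2.1) (hx : 0 < N.2.2) :
    bulk N voxelSize = bulk_alt N voxelSize := by
  obtain ⟨Z, Y, X⟩ := N
  simp only at hz hy hx
  have hne : ¬ (Z ≤ 0 ∨ Y ≤ 0 ∨ X ≤ 0) := by omega
  unfold bulk bulk_alt
  simp only [hne, if_false]
  rw [PySem.List.foldl_append_singleton_eq_map]
  rw [show (fun (acc : List (Int × Int × Int)) (k : Int) =>
        (PySem.List.pyRange 0 Y 1).foldl (fun acc j =>
          (PySem.List.pyRange 0 X 1).foldl (fun acc i => acc ++ [(k, j, i)]) acc) acc)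
      = (fun acc k => acc ++ (PySem.List.pyRange 0 Y 1).flatMap (fun j =>
          (PySem.List.pyRange 0 X 1).map (fun i => (k, j, i)))) from by
    funext acc k
    rw [show (fun (acc : List (Int × Int × Int)) (j : Int) =>
          (PySem.List.pyRange 0 X 1).foldl (fun acc i => acc ++ [(k, j, i)]) acc)
        = (fun acc j => acc ++ (PySem.List.pyRange 0 X 1).map (fun i => (k, j, i))) from by
      funext acc j
      exact PySem.List.foldl_append_singleton_eq_map _ _ _]
    exact PySem.List.foldl_append_eq_flatMap _ _ _]
  rw [PySem.List.foldl_append_eq_flatMap]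
  simp only [List.nil_append]
  -- now rewrite B's side via pv_decode, twice
  have hP : 0 < Y * X := by positivity
  have hZ : Z = ((Z.toNat : Nat) : Int) := by omega
  have hY : Y = ((Y.toNat : Nat) : Int) := by omega
  rw [hZ, hY]
  rw [pv_decode (fun k r => (k, PySem.Int.floordiv r X, PySem.Int.mod r X))
        (((Y.toNat : Nat) : Int) * X) (by rw [← hY]; exact hP) Z.toNat]
  apply List.flatMap_congr
  intro k _
  exact (pv_decode (fun j i => (k, j, i)) X hx Y.toNat).symm

theorem bulk_degenerate (N : Int × Int × Int) (voxelSize : Int)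
    (h : N.1 ≤ 0 ∨ N.2.1 ≤ 0 ∨ N.2.2 ≤ 0) :
    bulk N voxelSize = bulk_alt N voxelSize := by
  obtain ⟨Z, Y, X⟩ := N
  unfold bulk bulk_alt
  simp only at h
  simp only [h, if_true]
  rcases h with h | h | h
  · rw [PySem.List.pyRange_one_eq_nil h]; rfl
  · have : PySem.List.pyRange 0 Y 1 = [] := PySem.List.pyRange_one_eq_nil h
    simp [this]
  · have : PySem.List.pyRange 0 X 1 = [] := PySem.List.pyRange_one_eq_nil h
    simp [this, List.foldl_fixed]

-- ===== VERDICT (by name: the statement is the Claim_ definition above) =====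
theorem bulk_spec : Claim_equal_bulk := by
  intro N voxelSize _
  unfold Spec_bulk
  by_cases h : N.1 ≤ 0 ∨ N.2.1 ≤ 0 ∨ N.2.2 ≤ 0
  · exact bulk_degenerate N voxelSize h
  · push_neg at h
    exact bulk_pos N voxelSize h.1 h.2.1 h.2.2
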